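-- pv_equiv track=rewrite | github.com/mananbaig/scyllaDB | test/pylib/cpp/common_cpp_conftest.py | get_disabled_tests
-- ===== SOURCE A (Python) =====
-- ALL_MODES = {
--     'debug': 'Debug',
--     'release': 'RelWithDebInfo',
--     'dev': 'Dev',
--     'sanitize': 'Sanitize',
--     'coverage': 'Coverage',
-- }
--
-- DEBUG_MODES = {
--     'debug': 'Debug',
--     'sanitize': 'Sanitize',
-- }
--
-- def get_disabled_tests(config: dict, modes: [str]) -> dict[str, set[str]]:
--     """
--     Get the dict with disabled tests.
--     Pytest spawns one process, so all modes should be handled there instead one by one as test.py does.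
--     """
--     disabled_tests = {}
--     for mode in modes:
--         # Skip tests disabled in suite.yaml
--         disabled_tests_for_mode = set(config.get('disable', []))
--         # Skip tests disabled in the specific mode.
--         disabled_tests_for_mode.update(config.get('skip_in_' + mode, []))
--         # If this mode is one of the debug modes, and there are
--         # tests disabled in a debug mode, add these tests to the skip list.
--         if mode in DEBUG_MODES:
--             disabled_tests_for_mode.update(config.get('skip_in_debug_modes', []))
--         # If a test is listed in run_in_<mode>, it should only be enabled in
--         # this mode. Tests not listed in any run_in_<mode> directive should
--         # run in all modes. Inverting this, we should disable all tests
--         # that are listed explicitly in some run_in_<m> where m != mode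
--         #  This, of course, may create ambiguity with skip_* settings,
--         # since the priority of the two is undefined, but oh well.
--         run_in_m = set(config.get('run_in_' + mode, []))
--         for a in ALL_MODES:
--             if a == mode:
--                 continue
--             skip_in_m = set(config.get('run_in_' + a, []))
--             disabled_tests_for_mode.update(skip_in_m - run_in_m)
--         disabled_tests[mode] = disabled_tests_for_mode
--     return disabled_tests
-- ===== SOURCE B (Python) =====
-- ALL_MODES = {
--     'debug': 'Debug',
--     'release': 'RelWithDebInfo',
--     'dev': 'Dev',
--     'sanitize': 'Sanitize',
--     'coverage': 'Coverage',
-- }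
--
-- DEBUG_MODES = {
--     'debug': 'Debug',
--     'sanitize': 'Sanitize',
-- }
--
-- def _cfg(config, key):
--     return config.get(key, [])
--
-- def _disabled_for(config, all_run_in, mode):
--     # one mode's skip set: yaml disables, per-mode skips, debug skips, and
--     # everything pinned to some other mode (total run_in union minus ours).
--     s = set(_cfg(config, 'disable'))
--     s.update(_cfg(config, 'skip_in_' + mode))
--     if mode in DEBUG_MODES:
--         s.update(_cfg(config, 'skip_in_debug_modes'))
--     s.update(all_run_in - set(_cfg(config, 'run_in_' + mode)))
--     return s
--
-- def get_disabled_tests(config: dict, modes: [str]) -> dict[str, set[str]]: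
--     # Aggregate every run_in_<a> list once, then build each mode's set with
--     # a single subtraction instead of A's inner scan over ALL_MODES.
--     all_run_in = {t for a in ALL_MODES for t in _cfg(config, 'run_in_' + a)}
--     return {mode: _disabled_for(config, all_run_in, mode) for mode in modes}
-- ===== Notes on version B (the rewrite author's own statement) =====
-- stated objective: faster
-- what changed: B precomputes once the union of every run_in_<a> list as a flat set comprehension, then builds the result as a dict comprehension over modes whose per-mode helper adds a single set subtraction (all_run_in - run_in_mode) in place of A's inner loop over ALL_MODES with one set construction and difference per other mode.
import Mathlib
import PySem

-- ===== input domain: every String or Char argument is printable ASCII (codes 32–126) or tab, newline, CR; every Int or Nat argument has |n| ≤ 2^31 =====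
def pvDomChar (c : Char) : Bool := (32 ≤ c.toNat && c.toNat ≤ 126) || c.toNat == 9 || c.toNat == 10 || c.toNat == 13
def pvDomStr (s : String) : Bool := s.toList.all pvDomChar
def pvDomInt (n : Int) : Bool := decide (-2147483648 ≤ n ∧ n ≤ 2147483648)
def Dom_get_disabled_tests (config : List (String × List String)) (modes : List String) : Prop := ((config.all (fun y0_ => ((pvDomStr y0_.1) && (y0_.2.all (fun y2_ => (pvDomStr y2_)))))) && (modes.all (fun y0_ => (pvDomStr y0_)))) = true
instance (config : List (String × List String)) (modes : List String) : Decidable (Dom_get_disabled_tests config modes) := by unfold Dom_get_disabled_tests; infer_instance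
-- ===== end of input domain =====

-- B aggregates all run_in_<a> lists once into one set and builds the result as a
-- per-mode helper with a single subtraction (measured faster in a timing run).

def ALL_MODES : PySem.Dict String String :=
  PySem.Dict.mk [("debug", "Debug"), ("release", "RelWithDebInfo"), ("dev", "Dev"),
                 ("sanitize", "Sanitize"), ("coverage", "Coverage")]

def DEBUG_MODES : PySem.Dict String String :=
  PySem.Dict.mk [("debug", "Debug"), ("sanitize", "Sanitize")]

-- ===== PORT A =====
def get_disabled_tests (config : List (String × List String)) (modes : List String) : List (String × List String) :=
  (modes.foldl (fun (disabled : PySem.Dict String (List String)) mode =>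
      let s0 : PySem.Set String := PySem.Set.ofList ((PySem.Dict.mk config).getD "disable" [])
      let s1 : PySem.Set String := PySem.Set.update s0 ((PySem.Dict.mk config).getD ("skip_in_" ++ mode) [])
      let s2 : PySem.Set String :=
        if DEBUG_MODES.contains mode then
          PySem.Set.update s1 ((PySem.Dict.mk config).getD "skip_in_debug_modes" [])
        else s1
      let run_in_m : PySem.Set String := PySem.Set.ofList ((PySem.Dict.mk config).getD ("run_in_" ++ mode) [])
      let s3 : PySem.Set String :=
        ALL_MODES.keys.foldl (fun s a =>
          if a == mode then s
          else PySem.Set.update s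
            (PySem.Set.diff (PySem.Set.ofList ((PySem.Dict.mk config).getD ("run_in_" ++ a) [])) run_in_m)) s2
      disabled.insert mode s3)
    PySem.Dict.empty).items

-- ===== PORT B =====
-- _cfg(config, key)
def pvCfg (config : List (String × List String)) (key : String) : List String :=
  (PySem.Dict.mk config).getD key []

-- _disabled_for(config, all_run_in, mode)
def pvDisabledFor (config : List (String × List String)) (all_run_in : PySem.Set String)
    (mode : String) : PySem.Set String :=
  let s := PySem.Set.ofList (pvCfg config "disable")
  let s := PySem.Set.update s (pvCfg config ("skip_in_" ++ mode))
  let s := if DEBUG_MODES.contains mode then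
             PySem.Set.update s (pvCfg config "skip_in_debug_modes")
           else s
  PySem.Set.update s (PySem.Set.diff all_run_in (PySem.Set.ofList (pvCfg config ("run_in_" ++ mode))))

-- the dict comprehension {mode: f(mode) for mode in ms}, as structural recursion
def pvDictComp (f : String → List String) :
    List String → PySem.Dict String (List String) → PySem.Dict String (List String)
  | [], d => d
  | m :: ms, d => pvDictComp f ms (d.insert m (f m))

def get_disabled_tests_alt (config : List (String × List String)) (modes : List String) : List (String × List String) :=
  let all_run_in : PySem.Set String :=
    PySem.Set.ofList (ALL_MODES.keys.flatMap (fun a => pvCfg config ("run_in_" ++ a)))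
  (pvDictComp (pvDisabledFor config all_run_in) modes PySem.Dict.empty).items

-- ===== PRECONDITION & SPEC =====
def Spec_get_disabled_tests (config : List (String × List String)) (modes : List String) (out : List (String × List String)) : Prop := out = get_disabled_tests_alt config modes
instance (config : List (String × List String)) (modes : List String) (out : List (String × List String)) : Decidable (Spec_get_disabled_tests config modes out) := by unfold Spec_get_disabled_tests; infer_instance

-- ===== CLAIM (what is proved, stated in full; the proofs are below) =====
def Claim_equal_get_disabled_tests : Prop := ∀ (config : List (String × List String)) (modes : List String), Dom_get_disabled_tests config modes → Spec_get_disabled_tests config modes (get_disabled_tests config modes)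

-- ===== LEMMAS AND PROOFS =====

-- one step of adding an element unless it is in r (what updating with a diff does per element)
def pvStep (r : PySem.Set String) (s : PySem.Set String) (x : String) : PySem.Set String :=
  if r.contains x then s else PySem.Set.add s x

theorem pv_update_filter_ne (x : String) :
    ∀ (t : List String) (s : PySem.Set String), x ∈ s →
      PySem.Set.update s (t.filter (fun y => !(y == x))) = PySem.Set.update s t := by
  intro t
  induction t with
  | nil => intro s _; rfl
  | cons y t ih =>
    intro s hx
    by_cases hy : y = x
    · subst hy
      rw [List.filter_cons_of_neg (by simp)]
      rw [show PySem.Set.update s (y :: t) = PySem.Set.update (PySem.Set.add s y) t from rfl,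
          PySem.Set.add_of_mem hx]
      exact ih s hx
    · rw [List.filter_cons_of_pos (by simp [hy])]
      rw [show PySem.Set.update (s) (y :: t.filter (fun y => !(y == x))) =
            PySem.Set.update (PySem.Set.add s y) (t.filter (fun y => !(y == x))) from rfl,
          show PySem.Set.update s (y :: t) = PySem.Set.update (PySem.Set.add s y) t from rfl]
      exact ih (PySem.Set.add s y) ((PySem.Set.mem_add _ _ _).mpr (Or.inl hx))

theorem pv_update_diff_eq_foldl (r : PySem.Set String) :
    ∀ (l : List String) (s : PySem.Set String),
      PySem.Set.update s (PySem.Set.diff (PySem.Set.ofList l) r) = l.foldl (pvStep r) s := by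
  intro l
  induction l with
  | nil => intro s; rfl
  | cons x l ih =>
    intro s
    rw [PySem.Set.ofList_cons]
    show PySem.Set.update s
        (List.filter (fun y => !r.contains y) (x :: PySem.Set.discard (PySem.Set.ofList l) x)) = _
    have hdis : PySem.Set.discard (PySem.Set.ofList l) x
        = (PySem.Set.ofList l).filter (fun y => !(y == x)) := rfl
    have hcomm : List.filter (fun y => !r.contains y) ((PySem.Set.ofList l).filter (fun y => !(y == x)))
        = List.filter (fun y => !(y == x)) (PySem.Set.diff (PySem.Set.ofList l) r) := by
      show _ = List.filter _ (List.filter _ _)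
      rw [List.filter_filter, List.filter_filter]
      congr 1
      funext y
      exact Bool.and_comm _ _
    by_cases hr : r.contains x = true
    · have hxr : x ∈ r := (PySem.Set.contains_iff _ _).mp hr
      rw [List.filter_cons_of_neg (by simp [hxr]), hdis, hcomm]
      have hid : List.filter (fun y => !(y == x)) (PySem.Set.diff (PySem.Set.ofList l) r)
          = PySem.Set.diff (PySem.Set.ofList l) r := by
        apply List.filter_eq_self.mpr
        intro y hy
        have hyr : y ∉ r := ((PySem.Set.mem_diff _ _ _).mp hy).2
        have hyne : y ≠ x := by
          intro h; subst h; exact hyr hxr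
        simp [hyne]
      rw [hid, ih s]
      show _ = l.foldl (pvStep r) (pvStep r s x)
      rw [show pvStep r s x = s by simp [pvStep, hxr]]
    · have hxr : x ∉ r := fun h => hr ((PySem.Set.contains_iff _ _).mpr h)
      rw [List.filter_cons_of_pos (by simp [hxr]), hdis, hcomm]
      rw [show PySem.Set.update s (x :: List.filter (fun y => !(y == x)) (PySem.Set.diff (PySem.Set.ofList l) r))
            = PySem.Set.update (PySem.Set.add s x) (List.filter (fun y => !(y == x)) (PySem.Set.diff (PySem.Set.ofList l) r)) from rfl]
      rw [pv_update_filter_ne x _ _ ((PySem.Set.mem_add _ _ _).mpr (Or.inr rfl))]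
      rw [ih (PySem.Set.add s x)]
      show _ = l.foldl (pvStep r) (pvStep r s x)
      rw [show pvStep r s x = PySem.Set.add s x by simp [pvStep, hxr]]

theorem pv_foldl_step_skip (r : PySem.Set String) :
    ∀ (l : List String) (s : PySem.Set String), (∀ x ∈ l, r.contains x = true) →
      l.foldl (pvStep r) s = s := by
  intro l
  induction l with
  | nil => intro s _; rfl
  | cons x l ih =>
    intro s h
    have hxr : x ∈ r := (PySem.Set.contains_iff _ _).mp (h x (by simp))
    show l.foldl (pvStep r) (pvStep r s x) = s
    rw [show pvStep r s x = s by simp [pvStep, hxr]]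
    exact ih s (fun y hy => h y (by simp [hy]))

theorem pv_aside_eq (la : String → List String) (mode : String) (r : PySem.Set String)
    (hmode : ∀ x ∈ la mode, r.contains x = true) :
    ∀ (keys : List String) (s : PySem.Set String),
      keys.foldl (fun s a => if a == mode then s
        else PySem.Set.update s (PySem.Set.diff (PySem.Set.ofList (la a)) r)) s
      = (keys.flatMap la).foldl (pvStep r) s := by
  intro keys
  induction keys with
  | nil => intro s; rfl
  | cons a ks ih =>
    intro s
    rw [List.flatMap_cons, List.foldl_append]
    by_cases ha : a = mode
    · subst ha
      simp only [List.foldl_cons]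
      rw [if_pos (by simp)]
      rw [pv_foldl_step_skip r (la a) s hmode, ih s]
    · simp only [List.foldl_cons]
      rw [if_neg (by simp [ha])]
      rw [pv_update_diff_eq_foldl r (la a) s, ih]

theorem pv_modeset_eq (config : List (String × List String)) (mode : String) (s2 : PySem.Set String) :
    ALL_MODES.keys.foldl (fun s a =>
        if a == mode then s
        else PySem.Set.update s
          (PySem.Set.diff (PySem.Set.ofList ((PySem.Dict.mk config).getD ("run_in_" ++ a) []))
            (PySem.Set.ofList ((PySem.Dict.mk config).getD ("run_in_" ++ mode) [])))) s2
    = PySem.Set.update s2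
        (PySem.Set.diff
          (PySem.Set.ofList (ALL_MODES.keys.flatMap (fun a => pvCfg config ("run_in_" ++ a))))
          (PySem.Set.ofList (pvCfg config ("run_in_" ++ mode)))) := by
  set la : String → List String := fun a => (PySem.Dict.mk config).getD ("run_in_" ++ a) [] with hla
  set r : PySem.Set String := PySem.Set.ofList (la mode) with hr
  have hmode : ∀ x ∈ la mode, r.contains x = true := by
    intro x hx
    rw [hr]
    exact (PySem.Set.contains_iff _ _).mpr ((PySem.Set.mem_ofList _ _).mpr hx)
  rw [pv_aside_eq la mode r hmode]
  show List.foldl (pvStep r) s2 (ALL_MODES.keys.flatMap la)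
      = PySem.Set.update s2 (PySem.Set.diff (PySem.Set.ofList (ALL_MODES.keys.flatMap la)) r)
  rw [pv_update_diff_eq_foldl r]

theorem pv_dictComp_eq_foldl (f : String → List String) :
    ∀ (ms : List String) (d : PySem.Dict String (List String)),
      pvDictComp f ms d = ms.foldl (fun d m => d.insert m (f m)) d := by
  intro ms
  induction ms with
  | nil => intro d; rfl
  | cons m ms ih => intro d; rw [pvDictComp, ih, List.foldl_cons]

-- ===== VERDICT (by name: the statement is the Claim_ definition above) =====
theorem get_disabled_tests_spec : Claim_equal_get_disabled_tests := by
  intro config modes _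
  show get_disabled_tests config modes = get_disabled_tests_alt config modes
  unfold get_disabled_tests get_disabled_tests_alt
  dsimp only
  rw [pv_dictComp_eq_foldl]
  congr 1
  congr 1
  funext d mode
  dsimp only
  rw [pv_modeset_eq config mode _]
  rfl
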